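-- pv_equiv track=rewrite | github.com/spatial-machines/v0 | scripts/future/build_performance_dashboard.py | extract_dimension_results
-- ===== SOURCE A (Python) =====
-- QA_DIMENSIONS = [
--     "geometry",
--     "join_coverage",
--     "null_rate",
--     "crs",
--     "spatial_autocorr",
--     "feature_count",
--     "quantile_spread",
--     "output_existence",
--     "schema",
--     "value_range",
-- ]
--
-- def extract_dimension_results(record: dict) -> dict[str, str]:
--     """Extract pass/fail/warn per QA dimension from a validation record."""
--     results: dict[str, str] = {}
--     checks = record.get("checks", [])
--
--     for check in checks:
--         name = check.get("check", check.get("name", "")).lower()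
--         status = check.get("status", check.get("result", "UNKNOWN")).upper()
--
--         # Map check names to dimensions
--         for dim in QA_DIMENSIONS:
--             if dim in name or name in dim:
--                 # Take worst status if multiple checks map to same dimension
--                 existing = results.get(dim, "PASS")
--                 if status == "FAIL" or existing == "FAIL":
--                     results[dim] = "FAIL"
--                 elif status == "WARN" or existing == "WARN":
--                     results[dim] = "WARN"
--                 else:
--                     results[dim] = status
--                 break
--
--     return results
-- ===== SOURCE B (Python) =====
-- QA_DIMENSIONS = [
--     "geometry",
--     "join_coverage",
--     "null_rate",
--     "crs",
--     "spatial_autocorr",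
--     "feature_count",
--     "quantile_spread",
--     "output_existence",
--     "schema",
--     "value_range",
-- ]
--
-- def extract_dimension_results(record: dict) -> dict[str, str]:
--     """Extract pass/fail/warn per QA dimension from a validation record."""
--     # First pass: group the statuses of the checks by the dimension they map to.
--     groups: dict[str, list[str]] = {}
--     for check in record.get("checks", []):
--         name = check.get("check", check.get("name", "")).lower()
--         status = check.get("status", check.get("result", "UNKNOWN")).upper()
--         dim = next((d for d in QA_DIMENSIONS if d in name or name in d), None)
--         if dim is not None:
--             groups.setdefault(dim, []).append(status)
--     # Second pass: reduce each group to its worst status (last one wins otherwise).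
--     results: dict[str, str] = {}
--     for dim, statuses in groups.items():
--         if "FAIL" in statuses:
--             results[dim] = "FAIL"
--         elif "WARN" in statuses:
--             results[dim] = "WARN"
--         else:
--             results[dim] = statuses[-1]
--     return results
-- ===== Notes on version B (the rewrite author's own statement) =====
-- stated objective: alternative
-- what changed: Replaces A's single pass that maintains a running worst-status dict (combining each new status with the stored one in place) with a two-pass index-then-reduce structure: first group all statuses per matched QA dimension, then reduce each group (FAIL if any FAIL, else WARN if any WARN, else the last status).
import Mathlib
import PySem

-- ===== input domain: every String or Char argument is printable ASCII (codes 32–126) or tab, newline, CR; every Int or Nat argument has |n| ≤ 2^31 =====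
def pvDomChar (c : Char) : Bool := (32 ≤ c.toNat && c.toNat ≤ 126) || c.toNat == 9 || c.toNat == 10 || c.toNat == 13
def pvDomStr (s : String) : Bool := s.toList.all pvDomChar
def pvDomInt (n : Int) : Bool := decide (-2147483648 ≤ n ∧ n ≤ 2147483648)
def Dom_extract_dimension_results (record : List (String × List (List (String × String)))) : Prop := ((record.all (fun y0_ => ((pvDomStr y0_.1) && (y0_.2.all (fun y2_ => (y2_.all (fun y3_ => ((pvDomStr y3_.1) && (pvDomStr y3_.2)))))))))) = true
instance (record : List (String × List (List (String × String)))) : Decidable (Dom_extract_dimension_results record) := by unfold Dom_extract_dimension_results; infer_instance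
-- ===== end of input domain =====

-- B replaces A's running worst-status accumulator by a group-then-reduce decomposition
-- (first pass groups statuses per dimension, second pass reduces each group); objective: alternative.

-- ===== PORT A =====
def QA_DIMENSIONS : List String :=
  ["geometry", "join_coverage", "null_rate", "crs", "spatial_autocorr",
   "feature_count", "quantile_spread", "output_existence", "schema", "value_range"]

-- inner `for dim in QA_DIMENSIONS: … break` loop of A
def pvFindUpdate (results : PySem.Dict String String) (name status : String) :
    List String → PySem.Dict String String
  | [] => results
  | dim :: rest =>
    if PySem.Str.isIn dim name || PySem.Str.isIn name dim then
      let existing := results.getD dim "PASS"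
      if status = "FAIL" ∨ existing = "FAIL" then results.insert dim "FAIL"
      else if status = "WARN" ∨ existing = "WARN" then results.insert dim "WARN"
      else results.insert dim status
    else pvFindUpdate results name status rest

def extract_dimension_results (record : List (String × List (List (String × String)))) :
    List (String × String) :=
  let checks := (PySem.Dict.ofList record).getD "checks" []
  (checks.foldl (fun (results : PySem.Dict String String) check =>
      let cd := PySem.Dict.ofList check
      let name := PySem.Str.lower (cd.getD "check" (cd.getD "name" ""))
      let status := PySem.Str.upper (cd.getD "status" (cd.getD "result" "UNKNOWN"))
      pvFindUpdate results name status QA_DIMENSIONS)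
    PySem.Dict.empty).items

-- ===== PORT B =====
-- first matching dimension, `next((d for d in QA_DIMENSIONS if …), None)`
def pvFindDim (name : String) : List String → Option String
  | [] => none
  | dim :: rest =>
    if PySem.Str.isIn dim name || PySem.Str.isIn name dim then some dim
    else pvFindDim name rest

-- reduce one group; `statuses[-1]` — groups only ever hold nonempty lists, the "" default is unreachable
def pvReduce (statuses : List String) : String :=
  if statuses.contains "FAIL" then "FAIL"
  else if statuses.contains "WARN" then "WARN"
  else (PySem.List.pyGet? statuses (-1)).getD ""

def extract_dimension_results_alt (record : List (String × List (List (String × String)))) :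
    List (String × String) :=
  let checks := (PySem.Dict.ofList record).getD "checks" []
  let groups := checks.foldl (fun (groups : PySem.Dict String (List String)) check =>
      let cd := PySem.Dict.ofList check
      let name := PySem.Str.lower (cd.getD "check" (cd.getD "name" ""))
      let status := PySem.Str.upper (cd.getD "status" (cd.getD "result" "UNKNOWN"))
      match pvFindDim name QA_DIMENSIONS with
      | some dim => groups.insert dim (groups.getD dim [] ++ [status])
      | none => groups)
    PySem.Dict.empty
  groups.items.map (fun p => (p.1, pvReduce p.2))

-- ===== PRECONDITION & SPEC =====
def Spec_extract_dimension_results (record : List (String × List (List (String × String)))) (out : List (String × String)) : Prop := out = extract_dimension_results_alt record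
instance (record : List (String × List (List (String × String)))) (out : List (String × String)) : Decidable (Spec_extract_dimension_results record out) := by unfold Spec_extract_dimension_results; infer_instance

-- ===== CLAIM (what is proved, stated in full; the proofs are below) =====
def Claim_equal_extract_dimension_results : Prop := ∀ (record : List (String × List (List (String × String)))), Dom_extract_dimension_results record → Spec_extract_dimension_results record (extract_dimension_results record)

-- ===== LEMMAS AND PROOFS =====

-- B's grouping dict pushed through pvReduce, value by value
def pvMapRed (g : PySem.Dict String (List String)) : PySem.Dict String String :=
  PySem.Dict.mk (g.items.map (fun p => (p.1, pvReduce p.2)))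

theorem pvMapRed_keys (g : PySem.Dict String (List String)) : (pvMapRed g).keys = g.keys := by
  simp only [PySem.Dict.keys, pvMapRed, List.map_map]
  rfl

theorem pvMapRed_contains (g : PySem.Dict String (List String)) (k : String) :
    (pvMapRed g).contains k = g.contains k := by
  rw [PySem.Dict.contains_eq_decide_mem_keys, PySem.Dict.contains_eq_decide_mem_keys, pvMapRed_keys]

theorem pvMapRed_insert (g : PySem.Dict String (List String)) (dim : String) (v : List String) :
    pvMapRed (g.insert dim v) = (pvMapRed g).insert dim (pvReduce v) := by
  apply PySem.Dict.ext
  rw [show (pvMapRed (g.insert dim v)).items = (g.insert dim v).items.map (fun p => (p.1, pvReduce p.2)) from rfl,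
    PySem.Dict.items_insert, PySem.Dict.items_insert, pvMapRed_contains]
  by_cases h : g.contains dim = true
  · simp only [h, if_true]
    rw [show (pvMapRed g).items = g.items.map (fun p => (p.1, pvReduce p.2)) from rfl]
    rw [List.map_map, List.map_map]
    apply List.map_congr_left
    intro p _
    by_cases hp : p.1 == dim
    · have hpe : p.1 = dim := by simpa using hp
      simp [hpe]
    · have hpe : ¬ p.1 = dim := by simpa using hp
      simp [hpe]
  · simp only [Bool.not_eq_true] at h
    simp only [h, Bool.false_eq_true, if_false, List.map_append]
    rfl

theorem pvMapRed_getD (g : PySem.Dict String (List String)) (dim : String)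
    (hnd : g.keys.Nodup) (h : g.contains dim = true) :
    (pvMapRed g).getD dim "PASS" = pvReduce (g.getD dim []) := by
  rw [PySem.Dict.contains_eq_isSome_get?] at h
  obtain ⟨v, hv⟩ := Option.isSome_iff_exists.mp h
  have hmem := PySem.Dict.mem_items_of_get?_eq_some _ hv
  have hmem' : (dim, pvReduce v) ∈ (pvMapRed g).items := by
    rw [show (pvMapRed g).items = g.items.map (fun p => (p.1, pvReduce p.2)) from rfl]
    exact List.mem_map.mpr ⟨(dim, v), hmem, rfl⟩
  rw [PySem.Dict.getD_of_mem_items _ hmem' (by rw [pvMapRed_keys]; exact hnd) _,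
    PySem.Dict.getD_of_get?_eq_some _ _ hv]

theorem pvReduce_append (ss : List String) (s : String) (hne : ss ≠ []) :
    pvReduce (ss ++ [s]) =
      (if s = "FAIL" ∨ pvReduce ss = "FAIL" then "FAIL"
       else if s = "WARN" ∨ pvReduce ss = "WARN" then "WARN" else s) := by
  unfold pvReduce
  by_cases hF : "FAIL" ∈ ss
  · simp [hF]
  · by_cases hW : "WARN" ∈ ss
    · by_cases hsF : s = "FAIL" <;>
        simp [hF, hW, hsF, show ("FAIL" = s) ↔ (s = "FAIL") from eq_comm,
          show ("WARN" = s) ↔ (s = "WARN") from eq_comm]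
    · have hlast : (PySem.List.pyGet? ss (-1)).getD "" ∈ ss := by
        simp only [PySem.List.pyGet?, PySem.List.pyIdx?, Int.reduceNeg, Int.neg_nonneg,
          Int.reduceLE, ↓reduceIte, neg_le_neg_iff, Nat.one_le_cast, neg_neg, Int.toNat_one]
        have hl : 1 ≤ ss.length := List.length_pos_iff.mpr hne
        simp only [hl, if_true, Option.bind_some]
        rw [List.getElem?_eq_getElem (by omega)]
        exact List.getElem_mem _
      have h1 : (PySem.List.pyGet? ss (-1)).getD "" ≠ "FAIL" := fun he => hF (he ▸ hlast)
      have h2 : (PySem.List.pyGet? ss (-1)).getD "" ≠ "WARN" := fun he => hW (he ▸ hlast)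
      have h3 : PySem.List.pyGet? (ss ++ [s]) (-1) = some s := by
        simp only [PySem.List.pyGet?, PySem.List.pyIdx?, Int.reduceNeg, Int.neg_nonneg,
          Int.reduceLE, ↓reduceIte, neg_le_neg_iff, Nat.one_le_cast, neg_neg, Int.toNat_one,
          List.length_append, List.length_cons]
        have hl : 1 ≤ ss.length + 1 := by omega
        simp only [List.length_nil, Nat.zero_add, hl, if_true, Option.bind_some, Nat.add_sub_cancel]
        exact List.getElem?_concat_length
      by_cases hsF : s = "FAIL" <;> by_cases hsW : s = "WARN" <;>
        simp [hF, hW, hsF, hsW, h1, h2, h3, show ("FAIL" = s) ↔ (s = "FAIL") from eq_comm,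
          show ("WARN" = s) ↔ (s = "WARN") from eq_comm]

theorem pvReduce_singleton (s : String) :
    pvReduce ([] ++ [s]) =
      (if s = "FAIL" ∨ ("PASS" : String) = "FAIL" then "FAIL"
       else if s = "WARN" ∨ ("PASS" : String) = "WARN" then "WARN" else s) := by
  unfold pvReduce
  by_cases hsF : s = "FAIL" <;> by_cases hsW : s = "WARN" <;>
    simp [hsF, hsW, show ("FAIL" = s) ↔ (s = "FAIL") from eq_comm,
      show ("WARN" = s) ↔ (s = "WARN") from eq_comm, PySem.List.pyGet?, PySem.List.pyIdx?]

-- one check: A's inner dimension loop versus B's find-then-group step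
theorem pvStep_eq (name status : String) (g : PySem.Dict String (List String))
    (hnd : g.keys.Nodup) (hv : ∀ p ∈ g.items, p.2 ≠ ([] : List String)) (dims : List String) :
    pvFindUpdate (pvMapRed g) name status dims =
      pvMapRed (match pvFindDim name dims with
        | some dim => g.insert dim (g.getD dim [] ++ [status])
        | none => g) := by
  induction dims with
  | nil => rfl
  | cons dim rest ih =>
    by_cases hc : (PySem.Str.isIn dim name || PySem.Str.isIn name dim) = true
    · simp only [pvFindUpdate, pvFindDim, hc, if_true]
      rw [pvMapRed_insert]
      by_cases hcont : g.contains dim = true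
      · rw [pvMapRed_getD g dim hnd hcont]
        have hne : g.getD dim [] ≠ [] := by
          rw [PySem.Dict.contains_eq_isSome_get?] at hcont
          obtain ⟨v, hvv⟩ := Option.isSome_iff_exists.mp hcont
          rw [PySem.Dict.getD_of_get?_eq_some _ _ hvv]
          exact hv _ (PySem.Dict.mem_items_of_get?_eq_some _ hvv)
        rw [pvReduce_append _ _ hne]
        split_ifs <;> rfl
      · simp only [Bool.not_eq_true] at hcont
        rw [PySem.Dict.getD_of_not_contains g _ hcont,
          PySem.Dict.getD_of_not_contains (pvMapRed g) _ (by rw [pvMapRed_contains]; exact hcont)]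
        rw [pvReduce_singleton]
        split_ifs <;> rfl
    · simp only [pvFindUpdate, pvFindDim, hc]
      exact ih

theorem pvFold_eq (checks : List (List (String × String))) (g : PySem.Dict String (List String))
    (hnd : g.keys.Nodup) (hv : ∀ p ∈ g.items, p.2 ≠ ([] : List String)) :
    checks.foldl (fun (results : PySem.Dict String String) check =>
      let cd := PySem.Dict.ofList check
      let name := PySem.Str.lower (cd.getD "check" (cd.getD "name" ""))
      let status := PySem.Str.upper (cd.getD "status" (cd.getD "result" "UNKNOWN"))
      pvFindUpdate results name status QA_DIMENSIONS) (pvMapRed g) =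
    pvMapRed (checks.foldl (fun (groups : PySem.Dict String (List String)) check =>
      let cd := PySem.Dict.ofList check
      let name := PySem.Str.lower (cd.getD "check" (cd.getD "name" ""))
      let status := PySem.Str.upper (cd.getD "status" (cd.getD "result" "UNKNOWN"))
      match pvFindDim name QA_DIMENSIONS with
      | some dim => groups.insert dim (groups.getD dim [] ++ [status])
      | none => groups) g) := by
  induction checks generalizing g with
  | nil => rfl
  | cons c cs ih =>
    simp only [List.foldl_cons]
    rw [pvStep_eq _ _ g hnd hv]
    cases hfd : pvFindDim (PySem.Str.lower
        ((PySem.Dict.ofList c).getD "check" ((PySem.Dict.ofList c).getD "name" "")))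
        QA_DIMENSIONS with
    | none => exact ih g hnd hv
    | some dim =>
      apply ih
      · exact PySem.Dict.nodup_keys_insert _ _ _ hnd
      · intro p hp
        rcases (PySem.Dict.mem_items_insert _ _ _ _).mp hp with h | ⟨h, _⟩
        · rw [h]; simp
        · exact hv _ h

-- ===== VERDICT (by name: the statement is the Claim_ definition above) =====
theorem extract_dimension_results_spec : Claim_equal_extract_dimension_results := by
  intro record _
  unfold Spec_extract_dimension_results extract_dimension_results extract_dimension_results_alt
  have hv0 : ∀ p ∈ (PySem.Dict.empty : PySem.Dict String (List String)).items,
      p.2 ≠ ([] : List String) := by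
    intro p hp
    simp [PySem.Dict.empty] at hp
  have h := pvFold_eq ((PySem.Dict.ofList record).getD "checks" []) PySem.Dict.empty
    (by simp [PySem.Dict.empty, PySem.Dict.keys]) hv0
  exact congrArg PySem.Dict.items h
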